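-- pv_equiv track=rewrite | github.com/TiffanyAMG/CS1400-Biblioteca | M11/markov.py | construir_modelo
-- ===== SOURCE A (Python) =====
-- def construir_modelo(palabras):
--     """
--     Crea un diccionario donde cada palabra es una clave y su valor
--     es una lista de todas las palabras que la siguen.
--     """
--     modelo = {}
--     for i in range(len(palabras) - 1):
--         palabra_actual = palabras[i]
--         palabra_siguiente = palabras[i + 1]
--
--         if palabra_actual not in modelo:
--             modelo[palabra_actual] = []
--
--         modelo[palabra_actual].append(palabra_siguiente)
--
--     return modelo
-- ===== SOURCE B (Python) =====
-- def construir_modelo(palabras):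
--     """
--     Crea un diccionario donde cada palabra es una clave y su valor
--     es una lista de todas las palabras que la siguen.
--     """
--     claves = list(dict.fromkeys(palabras[:-1]))
--     n = len(palabras)
--     return {w: [palabras[i + 1] for i in range(n - 1) if palabras[i] == w]
--             for w in claves}
-- ===== Notes on version B (the rewrite author's own statement) =====
-- stated objective: alternative
-- what changed: A builds the dict in one accumulating pass that appends each successor as it walks the list; B first computes the distinct non-final words in first-occurrence order (dict.fromkeys of palabras[:-1]) and then builds the whole dict by a comprehension that rescans the list once per distinct key, collecting the successors of that key.
import Mathlib
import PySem

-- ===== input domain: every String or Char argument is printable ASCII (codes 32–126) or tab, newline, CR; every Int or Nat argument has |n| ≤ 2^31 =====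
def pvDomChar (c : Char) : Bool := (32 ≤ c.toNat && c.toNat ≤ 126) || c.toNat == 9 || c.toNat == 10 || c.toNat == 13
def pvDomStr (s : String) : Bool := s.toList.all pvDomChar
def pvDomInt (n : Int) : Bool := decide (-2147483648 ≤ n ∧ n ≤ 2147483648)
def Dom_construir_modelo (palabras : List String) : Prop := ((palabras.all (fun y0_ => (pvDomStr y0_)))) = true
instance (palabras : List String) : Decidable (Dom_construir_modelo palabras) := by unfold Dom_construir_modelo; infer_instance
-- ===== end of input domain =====

-- B replaces A's single accumulating dict pass by a group-by: distinct non-final words first, then one rescan per key (alternative decomposition, not faster).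


-- ===== PORT A =====
def construir_modelo (palabras : List String) : List (String × List String) :=
  let modelo : PySem.Dict String (List String) :=
    (PySem.List.pyRange 0 ((palabras.length : Int) - 1) 1).foldl
      (fun modelo i =>
        let palabra_actual := PySem.List.pyGetD palabras i ""
        let palabra_siguiente := PySem.List.pyGetD palabras (i + 1) ""
        let modelo :=
          if modelo.contains palabra_actual = false then modelo.insert palabra_actual []
          else modelo
        modelo.modify palabra_actual [] (fun l => l ++ [palabra_siguiente]))
      PySem.Dict.empty
  modelo.items

-- ===== PORT B =====
def construir_modelo_alt (palabras : List String) : List (String × List String) :=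
  let claves := PySem.List.dedup (PySem.List.slice palabras none (some (-1)))
  let n : Int := (palabras.length : Int)
  claves.map (fun w =>
    (w, (PySem.List.pyRange 0 (n - 1) 1).filterMap (fun i =>
          if PySem.List.pyGetD palabras i "" == w
          then some (PySem.List.pyGetD palabras (i + 1) "") else none)))

-- ===== PRECONDITION & SPEC =====
def Spec_construir_modelo (palabras : List String) (out : List (String × List String)) : Prop := out = construir_modelo_alt palabras
instance (palabras : List String) (out : List (String × List String)) : Decidable (Spec_construir_modelo palabras out) := by unfold Spec_construir_modelo; infer_instance

-- ===== CLAIM (what is proved, stated in full; the proofs are below) =====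
def Claim_equal_construir_modelo : Prop := ∀ (palabras : List String), Dom_construir_modelo palabras → Spec_construir_modelo palabras (construir_modelo palabras)

-- ===== LEMMAS AND PROOFS =====

-- range(len(xs)-1) indexed by xs[i], xs[i+1] enumerates the consecutive pairs of xs
theorem pv_pairs_eq (xs : List String) :
    (PySem.List.pyRange 0 ((xs.length : Int) - 1) 1).map
        (fun i => (PySem.List.pyGetD xs i "", PySem.List.pyGetD xs (i + 1) "")) =
      xs.zip xs.tail := by
  rw [PySem.List.pyRange_one, List.map_map]
  have hl : ((xs.length : Int) - 1 - 0).toNat = xs.length - 1 := by omega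
  rw [hl]
  apply List.ext_getElem
  · simp [List.length_zip]
  · intro k h1 h2
    have hk : k < xs.length - 1 := by simpa using h1
    have hk1 : k < xs.length := by omega
    have hk2 : k + 1 < xs.length := by omega
    have e1 : (0 : Int) + (k : Int) = ((k : Nat) : Int) := by omega
    have e2 : ((k : Nat) : Int) + 1 = (((k + 1 : Nat)) : Int) := by push_cast; ring
    simp only [List.getElem_map, List.getElem_range, Function.comp_apply, e1, e2,
      PySem.List.pyGetD_natCast, List.getElem_zip]
    simp [List.getElem_tail]
    rw [List.getElem?_eq_getElem hk1, List.getElem?_eq_getElem hk2]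
    exact ⟨rfl, rfl⟩

theorem pv_map_fst_zip_tail (xs : List String) :
    (xs.zip xs.tail).map Prod.fst = xs.dropLast := by
  apply List.ext_getElem
  · simp [List.length_zip]
  · intro k h1 h2
    have hk : k < xs.length - 1 := by simpa [List.length_zip] using h1
    simp [List.getElem_zip, List.getElem_dropLast]

-- A's loop body: the "not in → insert []" step followed by append is plain modify
theorem pv_step_eq (d : PySem.Dict String (List String)) (k : String) (b : String) :
    ((if d.contains k = false then d.insert k [] else d).modify k [] (fun l => l ++ [b])) =
      d.modify k [] (fun l => l ++ [b]) := by
  by_cases h : d.contains k = true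
  · simp [h]
  · have h' : d.contains k = false := by simpa using h
    rw [if_pos h']
    simp only [PySem.Dict.modify]
    rw [PySem.Dict.getD_insert_self, PySem.Dict.insert_insert_self,
      PySem.Dict.getD_of_not_contains d [] h']

theorem pv_filterMap_pairs (ps : List (String × String)) (w : String) :
    ps.filterMap (fun p => if p.1 == w then some p.2 else none)
      = (ps.filter (fun p => p.1 == w)).map (fun p => p.2) := by
  induction ps with
  | nil => rfl
  | cons p t ih =>
    by_cases h : p.1 = w
    · simp [h]
      simpa using ih
    · simp [h]
      simpa using ih

-- ===== VERDICT (by name: the statement is the Claim_ definition above) =====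
theorem construir_modelo_spec : Claim_equal_construir_modelo := by
  intro palabras _
  unfold Spec_construir_modelo construir_modelo construir_modelo_alt
  have hA :
      (PySem.List.pyRange 0 ((palabras.length : Int) - 1) 1).foldl
        (fun modelo i =>
          let palabra_actual := PySem.List.pyGetD palabras i ""
          let palabra_siguiente := PySem.List.pyGetD palabras (i + 1) ""
          let modelo :=
            if modelo.contains palabra_actual = false then modelo.insert palabra_actual []
            else modelo
          modelo.modify palabra_actual [] (fun l => l ++ [palabra_siguiente]))
        PySem.Dict.empty
      = (palabras.zip palabras.tail).foldl
          (fun d p => d.modify p.1 [] (fun l => l ++ [p.2])) PySem.Dict.empty := by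
    rw [← pv_pairs_eq palabras, List.foldl_map]
    apply PySem.List.foldl_congr_mem
    intro acc i _
    exact pv_step_eq acc _ _
  rw [hA]
  set ps := palabras.zip palabras.tail with hps
  have hnd : ((ps.foldl (fun d p => d.modify p.1 [] (fun l => l ++ [p.2]))
      PySem.Dict.empty).keys).Nodup :=
    PySem.Dict.nodup_keys_foldl_modify_key ps Prod.fst []
      (fun _ p l => l ++ [p.2]) PySem.Dict.empty PySem.Dict.nodup_keys_empty
  rw [PySem.Dict.items_eq_map_keys _ hnd []]
  have hkeys : (ps.foldl (fun d p => d.modify p.1 [] (fun l => l ++ [p.2]))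
      PySem.Dict.empty).keys = PySem.Set.ofList (ps.map Prod.fst) := by
    have h := PySem.Dict.keys_foldl_modify_key ps Prod.fst []
      (fun _ p l => l ++ [p.2]) PySem.Dict.empty
    simpa [PySem.Dict.keys_empty, PySem.Set.update_nil_left] using h
  rw [hkeys, pv_map_fst_zip_tail, PySem.List.slice_to_neg_one,
    PySem.List.dedup_eq_ofList]
  apply List.map_congr_left
  intro w _
  have hget := PySem.Dict.getD_foldl_modify_append ps PySem.Dict.empty w
  rw [hget, PySem.Dict.getD_empty, List.nil_append]
  have hfm : (PySem.List.pyRange 0 ((palabras.length : Int) - 1) 1).filterMap (fun i =>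
        if PySem.List.pyGetD palabras i "" == w
        then some (PySem.List.pyGetD palabras (i + 1) "") else none)
      = ps.filterMap (fun p => if p.1 == w then some p.2 else none) := by
    rw [hps, ← pv_pairs_eq palabras, List.filterMap_map]
    rfl
  rw [hfm, pv_filterMap_pairs]
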